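-- pv_equiv track=rewrite | github.com/sidekick9497/pythonPrograms | buildingProblem.py | calculate
-- ===== SOURCE A (Python) =====
-- def calculate(heightsList, cost):
--     street_salary = 0
--     max_height_index = 0
--     street_salary += cost
--     for i in range(1, len(heightsList)):
--         if (heightsList[i] > heightsList[max_height_index]):
--             max_height_index = i
--             street_salary += cost
--
--     return street_salary
-- ===== SOURCE B (Python) =====
-- def calculate(heightsList, cost):
--     # Pass 1: build the running-maximum table.
--     running = []
--     current = None
--     for h in heightsList:
--         if current is None or h > current:
--             current = h
--         running.append(current)
--     # Pass 2: count strict increases between adjacent running maxima.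
--     count = 1 + sum(1 for a, b in zip(running, running[1:]) if b > a)
--     return count * cost
-- ===== Notes on version B (the rewrite author's own statement) =====
-- stated objective: alternative
-- what changed: Replaces the index-tracking single sweep with a two-pass decomposition: first build the running-maximum table, then count strict increases between adjacent table entries and multiply the count by cost.
import Mathlib
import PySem

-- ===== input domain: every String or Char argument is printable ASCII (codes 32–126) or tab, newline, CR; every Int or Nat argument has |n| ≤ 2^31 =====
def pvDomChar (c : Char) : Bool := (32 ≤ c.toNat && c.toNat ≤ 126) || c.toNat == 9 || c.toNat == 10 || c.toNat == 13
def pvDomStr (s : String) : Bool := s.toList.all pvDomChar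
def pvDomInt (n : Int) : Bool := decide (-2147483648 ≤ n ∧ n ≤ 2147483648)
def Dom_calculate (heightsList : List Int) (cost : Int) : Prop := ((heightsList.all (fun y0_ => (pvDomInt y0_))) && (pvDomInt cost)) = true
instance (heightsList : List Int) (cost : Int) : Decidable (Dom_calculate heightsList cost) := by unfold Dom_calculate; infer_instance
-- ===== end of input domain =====

-- B replaces A's single index-tracking sweep by a two-pass decomposition (build the
-- running-maximum table, then count strict increases between adjacent entries); same cost.

-- ===== PORT A =====
-- literal transliteration of A: fold over range(1, len) keeping (street_salary, max_height_index)
def calculate (heightsList : List Int) (cost : Int) : Int :=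
  ((PySem.List.pyRange 1 (PySem.List.len heightsList) 1).foldl
    (fun (st : Int × Int) i =>
      if PySem.List.pyGetD heightsList i 0 > PySem.List.pyGetD heightsList st.2 0 then
        (st.1 + cost, i)
      else st)
    (0 + cost, 0)).1

-- ===== PORT B =====
-- pass 1 of Source B: the running-maximum table (state = (running, current))
def bRunning (heightsList : List Int) : List Int :=
  (heightsList.foldl
    (fun (st : List Int × Option Int) h =>
      let current : Int :=
        match st.2 with
        | none => h
        | some m => if h > m then h else m
      (st.1 ++ [current], some current))
    ([], none)).1

-- pass 2 of Source B: count strict increases between adjacent running maxima, times cost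
def calculate_alt (heightsList : List Int) (cost : Int) : Int :=
  let running := bRunning heightsList
  let count : Int :=
    1 + (((running.zip (running.drop 1)).countP (fun p => decide (p.2 > p.1)) : Nat) : Int)
  count * cost

-- ===== PRECONDITION & SPEC =====
def Spec_calculate (heightsList : List Int) (cost : Int) (out : Int) : Prop := out = calculate_alt heightsList cost
instance (heightsList : List Int) (cost : Int) (out : Int) : Decidable (Spec_calculate heightsList cost out) := by unfold Spec_calculate; infer_instance

-- ===== CLAIM (what is proved, stated in full; the proofs are below) =====
def Claim_equal_calculate : Prop := ∀ (heightsList : List Int) (cost : Int), Dom_calculate heightsList cost → Spec_calculate heightsList cost (calculate heightsList cost)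

-- ===== LEMMAS AND PROOFS =====

-- A's fold as a named value (definitionally the pair inside `calculate`)
def AFold (hs : List Int) (cost : Int) : Int × Int :=
  (PySem.List.pyRange 1 (PySem.List.len hs) 1).foldl
    (fun (st : Int × Int) i =>
      if PySem.List.pyGetD hs i 0 > PySem.List.pyGetD hs st.2 0 then
        (st.1 + cost, i)
      else st)
    (0 + cost, 0)

-- B's increase count as a named value
def cnt (r : List Int) : Int :=
  (((r.zip (r.drop 1)).countP (fun p => decide (p.2 > p.1)) : Nat) : Int)

-- B's fold pair
def bFold (hs : List Int) : List Int × Option Int :=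
  hs.foldl
    (fun (st : List Int × Option Int) h =>
      let current : Int :=
        match st.2 with
        | none => h
        | some m => if h > m then h else m
      (st.1 ++ [current], some current))
    ([], none)

theorem bFold_append_step (hs : List Int) (x : Int) :
    bFold (hs ++ [x]) =
      ((bFold hs).1 ++ [match (bFold hs).2 with
          | none => x
          | some m => if x > m then x else m],
       some (match (bFold hs).2 with
          | none => x
          | some m => if x > m then x else m)) := by
  simp [bFold, List.foldl_append]

theorem bFold_facts (hs : List Int) (h : hs ≠ []) :
    (bFold hs).1 ≠ [] ∧ (bFold hs).2 = some ((bFold hs).1.getLastD 0) := by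
  induction hs using List.reverseRecOn with
  | nil => exact absurd rfl h
  | append_singleton hs x ih =>
    rw [bFold_append_step]
    rcases eq_or_ne hs [] with rfl | hne
    · simp [bFold]
    · obtain ⟨h1, h2⟩ := ih hne
      simp [h2]

theorem bRunning_append (hs : List Int) (x : Int) (h : hs ≠ []) :
    bRunning (hs ++ [x]) =
      bRunning hs ++ [if x > (bRunning hs).getLastD 0 then x else (bRunning hs).getLastD 0] := by
  obtain ⟨h1, h2⟩ := bFold_facts hs h
  have : bRunning (hs ++ [x]) = (bFold (hs ++ [x])).1 := rfl
  rw [this, bFold_append_step, h2]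
  rfl

theorem zip_tail_append (r : List Int) (v : Int) (h : r ≠ []) :
    (r ++ [v]).zip ((r ++ [v]).drop 1) = r.zip (r.drop 1) ++ [(r.getLastD 0, v)] := by
  induction r with
  | nil => exact absurd rfl h
  | cons a r ih =>
    cases r with
    | nil => simp
    | cons b r' =>
      have := ih (by simp)
      simpa using this

theorem cnt_append (r : List Int) (v : Int) (h : r ≠ []) :
    cnt (r ++ [v]) = cnt r + (if v > r.getLastD 0 then 1 else 0) := by
  unfold cnt
  rw [zip_tail_append r v h, List.countP_append]
  by_cases hv : v > r.getLastD 0 <;> simp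

theorem pyGetD_append_left (hs : List Int) (x : Int) (j : Int)
    (h0 : 0 ≤ j) (h1 : j < PySem.List.len hs) :
    PySem.List.pyGetD (hs ++ [x]) j 0 = PySem.List.pyGetD hs j 0 := by
  rw [PySem.List.len_eq] at h1
  have hj : j.toNat < hs.length := by omega
  rw [PySem.List.pyGetD_eq_getElem (hs ++ [x]) 0 h0 (by simp; omega),
      PySem.List.pyGetD_eq_getElem hs 0 h0 (by exact_mod_cast h1)]
  exact List.getElem_append_left hj

theorem AFold_congr (hs : List Int) (x cost : Int) (l : List Int)
    (hmem : ∀ i ∈ l, 0 ≤ i ∧ i < PySem.List.len hs) :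
    ∀ st : Int × Int, 0 ≤ st.2 → st.2 < PySem.List.len hs →
    (l.foldl (fun (st : Int × Int) i =>
        if PySem.List.pyGetD (hs ++ [x]) i 0 > PySem.List.pyGetD (hs ++ [x]) st.2 0 then
          (st.1 + cost, i) else st) st)
      = (l.foldl (fun (st : Int × Int) i =>
        if PySem.List.pyGetD hs i 0 > PySem.List.pyGetD hs st.2 0 then
          (st.1 + cost, i) else st) st) := by
  induction l with
  | nil => intro st _ _; rfl
  | cons a l ih =>
    intro st h0 h1
    obtain ⟨ha0, ha1⟩ := hmem a (by simp)
    have e1 := pyGetD_append_left hs x a ha0 ha1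
    have e2 := pyGetD_append_left hs x st.2 h0 h1
    simp only [List.foldl_cons, e1, e2]
    have hmem' : ∀ i ∈ l, 0 ≤ i ∧ i < PySem.List.len hs := fun i hi => hmem i (by simp [hi])
    by_cases hc : PySem.List.pyGetD hs a 0 > PySem.List.pyGetD hs st.2 0
    · rw [if_pos hc]; exact ih hmem' _ ha0 ha1
    · rw [if_neg hc]; exact ih hmem' st h0 h1

theorem pyGetD_append_last (hs : List Int) (x : Int) :
    PySem.List.pyGetD (hs ++ [x]) (PySem.List.len hs) 0 = x := by
  rw [PySem.List.len_eq]
  simp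

theorem AFold_append (hs : List Int) (x cost : Int) (h : hs ≠ [])
    (hb0 : 0 ≤ (AFold hs cost).2) (hb1 : (AFold hs cost).2 < PySem.List.len hs) :
    AFold (hs ++ [x]) cost =
      (if x > PySem.List.pyGetD hs (AFold hs cost).2 0 then
        ((AFold hs cost).1 + cost, PySem.List.len hs)
      else AFold hs cost) := by
  have hlen : PySem.List.len (hs ++ [x]) = PySem.List.len hs + 1 := by
    simp [PySem.List.len_eq]
  have h1 : (1 : Int) ≤ PySem.List.len hs := by
    rw [PySem.List.len_eq]
    have : hs.length ≠ 0 := fun e => h (List.eq_nil_of_length_eq_zero e)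
    omega
  unfold AFold
  rw [hlen, PySem.List.pyRange_one_succ_right h1, List.foldl_append, List.foldl_cons,
      List.foldl_nil]
  have hmem : ∀ i ∈ PySem.List.pyRange 1 (PySem.List.len hs) 1,
      0 ≤ i ∧ i < PySem.List.len hs := by
    intro i hi
    rw [PySem.List.mem_pyRange_one] at hi
    omega
  rw [AFold_congr hs x cost _ hmem (0 + cost, 0) (by simp) (by simpa using h1)]
  have hA : (PySem.List.pyRange 1 (PySem.List.len hs) 1).foldl
      (fun (st : Int × Int) i =>
        if PySem.List.pyGetD hs i 0 > PySem.List.pyGetD hs st.2 0 then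
          (st.1 + cost, i) else st) (0 + cost, 0) = AFold hs cost := rfl
  rw [hA, pyGetD_append_last, pyGetD_append_left hs x _ hb0 hb1]

theorem main_inv (hs : List Int) (h : hs ≠ []) (cost : Int) :
    0 ≤ (AFold hs cost).2 ∧ (AFold hs cost).2 < PySem.List.len hs ∧
    PySem.List.pyGetD hs (AFold hs cost).2 0 = (bRunning hs).getLastD 0 ∧
    (AFold hs cost).1 = (1 + cnt (bRunning hs)) * cost := by
  induction hs using List.reverseRecOn with
  | nil => exact absurd rfl h
  | append_singleton hs x ih =>
    rcases eq_or_ne hs [] with rfl | hne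
    · refine ⟨le_refl 0, by simp [AFold, PySem.List.len_eq], ?_, ?_⟩
      · simp [AFold, bRunning, PySem.List.len_eq, PySem.List.pyRange_one_eq_nil (le_refl 1),
          PySem.List.pyGetD_zero_cons]
      · simp [AFold, bRunning, cnt, PySem.List.len_eq, PySem.List.pyRange_one_eq_nil (le_refl 1)]
    · obtain ⟨ih0, ih1, ih2, ih3⟩ := ih hne
      have hr : bRunning hs ≠ [] := (bFold_facts hs hne).1
      have hlen : PySem.List.len (hs ++ [x]) = PySem.List.len hs + 1 := by
        simp [PySem.List.len_eq]
      rw [AFold_append hs x cost hne ih0 ih1, bRunning_append hs x hne, ih2]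
      by_cases hc : x > (bRunning hs).getLastD 0
      · rw [if_pos hc, if_pos hc]
        refine ⟨by rw [PySem.List.len_eq]; positivity, by omega, ?_, ?_⟩
        · rw [pyGetD_append_last]
          simp
        · rw [cnt_append _ _ hr, if_pos hc, ih3]
          ring
      · rw [if_neg hc, if_neg hc]
        refine ⟨ih0, by omega, ?_, ?_⟩
        · rw [pyGetD_append_left hs x _ ih0 ih1, ih2]
          simp
        · rw [cnt_append _ _ hr, ih3]
          norm_num

-- ===== VERDICT (by name: the statement is the Claim_ definition above) =====
theorem calculate_spec : Claim_equal_calculate := by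
  intro hs cost _
  unfold Spec_calculate
  rcases eq_or_ne hs [] with rfl | h
  · simp [calculate, calculate_alt, bRunning, PySem.List.len, PySem.List.pyRange]
  · have hm := main_inv hs h cost
    have : calculate hs cost = (AFold hs cost).1 := rfl
    rw [this, hm.2.2.2]
    simp [calculate_alt, cnt]
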